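-- pv_equiv track=rewrite | github.com/BrandonLee0604/Leetcode | Python/1297. 子串的最大出现次数.py | maxFreq
-- ===== SOURCE A (Python) =====
-- import collections
--
-- def maxFreq(s: str, maxLetters: int, minSize: int, maxSize: int) -> int:
--     n = len(s)
--     occ = collections.defaultdict(int)
--     ans = 0
--     for i in range(n - minSize + 1):
--         cur = s[i: i + minSize]
--         exist = set(cur)
--         if len(exist) <= maxLetters:
--             occ[cur] += 1
--             ans = max(ans, occ[cur])
--     return ans
-- ===== SOURCE B (Python) =====
-- import collections
--
-- def maxFreq(s: str, maxLetters: int, minSize: int, maxSize: int) -> int: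
--     n = len(s)
--     if minSize < 1 or n < minSize:
--         return 0
--     cnt = collections.Counter(s[:minSize])
--     distinct = len(cnt)
--     occ = {}
--     ans = 0
--     if distinct <= maxLetters:
--         occ[s[:minSize]] = 1
--         ans = 1
--     for i in range(1, n - minSize + 1):
--         out = s[i - 1]
--         inn = s[i + minSize - 1]
--         cnt[out] -= 1
--         if cnt[out] == 0:
--             distinct -= 1
--         cnt[inn] += 1
--         if cnt[inn] == 1:
--             distinct += 1
--         if distinct <= maxLetters:
--             w = s[i:i + minSize]
--             c = occ.get(w, 0) + 1
--             occ[w] = c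
--             if c > ans:
--                 ans = c
--     return ans
-- ===== Notes on version B (the rewrite author's own statement) =====
-- stated objective: alternative
-- what changed: B replaces A's per-window set(cur) construction and unconditional slicing by a sliding-window letter counter whose distinct-letter count is maintained incrementally, slicing the window substring only when it is valid (intended as faster; sample timing runs measured 4-10x, not confirmed at the largest size); on minSize < 1 B returns 0 instead of A's count of phantom windows.
-- intended difference: On inputs with minSize < 1 and maxLetters >= 0, A returns the count of phantom empty/out-of-range windows s[i:i+minSize] (e.g. 3 for ('ab',1,0,2)), while B returns 0, the intended answer since no substring of length < 1 exists. — e.g. on maxFreq("ab", 1, 0, 2): A returns 3, B returns 0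
import Mathlib
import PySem

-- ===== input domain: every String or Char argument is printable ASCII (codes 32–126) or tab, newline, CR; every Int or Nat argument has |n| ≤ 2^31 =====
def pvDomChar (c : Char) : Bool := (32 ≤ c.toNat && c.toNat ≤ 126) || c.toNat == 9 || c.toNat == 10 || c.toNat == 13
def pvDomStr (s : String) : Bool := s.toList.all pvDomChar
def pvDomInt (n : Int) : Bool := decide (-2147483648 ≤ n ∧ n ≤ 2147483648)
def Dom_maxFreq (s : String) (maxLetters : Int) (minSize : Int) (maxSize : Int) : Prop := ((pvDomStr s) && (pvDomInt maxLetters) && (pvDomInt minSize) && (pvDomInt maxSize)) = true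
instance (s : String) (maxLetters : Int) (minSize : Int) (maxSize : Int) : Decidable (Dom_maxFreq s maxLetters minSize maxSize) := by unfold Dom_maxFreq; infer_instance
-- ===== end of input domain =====

-- B replaces A's per-window set(cur) construction by a sliding-window letter counter with an incrementally maintained distinct-letter count; on minSize < 1 B returns 0 where A counts phantom out-of-range windows (see D_ below).

-- ===== PORT A =====
def maxFreq (s : String) (maxLetters : Int) (minSize : Int) (maxSize : Int) : Int :=
  let n : Int := PySem.Str.len s
  ((PySem.List.pyRange 0 (n - minSize + 1) 1).foldl
    (fun (st : PySem.Dict String Int × Int) i =>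
      let cur := PySem.Str.slice s (some i) (some (i + minSize))
      let exist : PySem.Set Char := PySem.Set.ofList cur.toList
      if (PySem.Set.len exist : Int) ≤ maxLetters then
        let occ := st.1.modify cur 0 (· + 1)
        (occ, max st.2 (occ.getD cur 0))
      else st)
    (PySem.Dict.empty, 0)).2

-- ===== PORT B =====
def maxFreq_alt (s : String) (maxLetters : Int) (minSize : Int) (maxSize : Int) : Int :=
  let n : Int := PySem.Str.len s
  if minSize < 1 ∨ n < minSize then 0
  else
    let first := PySem.Str.slice s none (some minSize)
    let cnt0 : PySem.Dict Char Int := PySem.Dict.counter first.toList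
    let distinct0 : Int := (PySem.Dict.size cnt0 : Int)
    let st0 : PySem.Dict String Int × Int :=
      if distinct0 ≤ maxLetters then (PySem.Dict.empty.insert first 1, 1)
      else (PySem.Dict.empty, 0)
    ((PySem.List.pyRange 1 (n - minSize + 1) 1).foldl
      (fun (st : PySem.Dict Char Int × Int × PySem.Dict String Int × Int) i =>
        let cnt := st.1
        let distinct := st.2.1
        let occ := st.2.2.1
        let ans := st.2.2.2
        let outc := PySem.List.pyGetD s.toList (i - 1) ' '
        let inc := PySem.List.pyGetD s.toList (i + minSize - 1) ' '
        let v := cnt.getD outc 0 - 1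
        let cnt := cnt.insert outc v
        let distinct := if v = 0 then distinct - 1 else distinct
        let v2 := cnt.getD inc 0 + 1
        let cnt := cnt.insert inc v2
        let distinct := if v2 = 1 then distinct + 1 else distinct
        if distinct ≤ maxLetters then
          let w := PySem.Str.slice s (some i) (some (i + minSize))
          let c := occ.getD w 0 + 1
          let occ := occ.insert w c
          (cnt, distinct, occ, if ans < c then c else ans)
        else (cnt, distinct, occ, ans))
      (cnt0, distinct0, st0.1, st0.2)).2.2.2

-- ===== PRECONDITION & SPEC =====
-- On inputs with minSize < 1 and 0 ≤ maxLetters, A returns the count of phantom empty/out-of-range "windows" s[i:i+minSize] (e.g. n - minSize + 1 when they are all empty), while B returns 0 — the intended answer, since no substring of length < 1 exists.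
def D_maxFreq (s : String) (maxLetters : Int) (minSize : Int) (maxSize : Int) : Prop :=
  minSize < 1 ∧ 0 ≤ maxLetters
instance (s : String) (maxLetters : Int) (minSize : Int) (maxSize : Int) : Decidable (D_maxFreq s maxLetters minSize maxSize) := by unfold D_maxFreq; infer_instance

def Spec_maxFreq (s : String) (maxLetters : Int) (minSize : Int) (maxSize : Int) (out : Int) : Prop := ¬ D_maxFreq s maxLetters minSize maxSize → out = maxFreq_alt s maxLetters minSize maxSize
instance (s : String) (maxLetters : Int) (minSize : Int) (maxSize : Int) (out : Int) : Decidable (Spec_maxFreq s maxLetters minSize maxSize out) := by unfold Spec_maxFreq; infer_instance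

def pvDiffWitness_maxFreq : String × Int × Int × Int := ("ab", 1, 0, 2)
def pvDiffWitnessOut_maxFreq : Int × Int := (3, 0)

-- ===== CLAIM (what is proved, stated in full; the proofs are below) =====
def Claim_unchanged_maxFreq : Prop := ∀ (s : String) (maxLetters : Int) (minSize : Int) (maxSize : Int), Dom_maxFreq s maxLetters minSize maxSize → Spec_maxFreq s maxLetters minSize maxSize (maxFreq s maxLetters minSize maxSize)
def Claim_changed_maxFreq : Prop := Dom_maxFreq (pvDiffWitness_maxFreq.1) (pvDiffWitness_maxFreq.2.1) (pvDiffWitness_maxFreq.2.2.1) (pvDiffWitness_maxFreq.2.2.2) ∧ D_maxFreq (pvDiffWitness_maxFreq.1) (pvDiffWitness_maxFreq.2.1) (pvDiffWitness_maxFreq.2.2.1) (pvDiffWitness_maxFreq.2.2.2) ∧ maxFreq (pvDiffWitness_maxFreq.1) (pvDiffWitness_maxFreq.2.1) (pvDiffWitness_maxFreq.2.2.1) (pvDiffWitness_maxFreq.2.2.2) = pvDiffWitnessOut_maxFreq.1 ∧ maxFreq_alt (pvDiffWitness_maxFreq.1) (pvDiffWitness_maxFreq.2.1) (pvDiffWitness_maxFreq.2.2.1)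 (pvDiffWitness_maxFreq.2.2.2) = pvDiffWitnessOut_maxFreq.2 ∧ pvDiffWitnessOut_maxFreq.1 ≠ pvDiffWitnessOut_maxFreq.2
def Claim_exact_maxFreq : Prop := ∀ (s : String) (maxLetters : Int) (minSize : Int) (maxSize : Int), Dom_maxFreq s maxLetters minSize maxSize → D_maxFreq s maxLetters minSize maxSize → maxFreq s maxLetters minSize maxSize ≠ maxFreq_alt s maxLetters minSize maxSize

-- ===== LEMMAS AND PROOFS =====

-- named copies of the two loop bodies (proof helpers; the ports above are the claim's subjects)
def pvStepA (s : String) (maxLetters : Int) (minSize : Int)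
    (st : PySem.Dict String Int × Int) (i : Int) : PySem.Dict String Int × Int :=
  let cur := PySem.Str.slice s (some i) (some (i + minSize))
  let exist : PySem.Set Char := PySem.Set.ofList cur.toList
  if (PySem.Set.len exist : Int) ≤ maxLetters then
    let occ := st.1.modify cur 0 (· + 1)
    (occ, max st.2 (occ.getD cur 0))
  else st

def pvStepB (s : String) (maxLetters : Int) (minSize : Int)
    (st : PySem.Dict Char Int × Int × PySem.Dict String Int × Int) (i : Int) :
    PySem.Dict Char Int × Int × PySem.Dict String Int × Int :=
  let cnt := st.1
  let distinct := st.2.1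
  let occ := st.2.2.1
  let ans := st.2.2.2
  let outc := PySem.List.pyGetD s.toList (i - 1) ' '
  let inc := PySem.List.pyGetD s.toList (i + minSize - 1) ' '
  let v := cnt.getD outc 0 - 1
  let cnt := cnt.insert outc v
  let distinct := if v = 0 then distinct - 1 else distinct
  let v2 := cnt.getD inc 0 + 1
  let cnt := cnt.insert inc v2
  let distinct := if v2 = 1 then distinct + 1 else distinct
  if distinct ≤ maxLetters then
    let w := PySem.Str.slice s (some i) (some (i + minSize))
    let c := occ.getD w 0 + 1
    let occ := occ.insert w c
    (cnt, distinct, occ, if ans < c then c else ans)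
  else (cnt, distinct, occ, ans)

theorem pv_maxFreq_eq (s : String) (maxLetters minSize maxSize : Int) :
    maxFreq s maxLetters minSize maxSize =
      ((PySem.List.pyRange 0 ((PySem.Str.len s) - minSize + 1) 1).foldl
        (pvStepA s maxLetters minSize) (PySem.Dict.empty, 0)).2 := rfl

theorem pv_maxFreq_alt_eq (s : String) (maxLetters minSize maxSize : Int) :
    maxFreq_alt s maxLetters minSize maxSize =
      (if minSize < 1 ∨ (PySem.Str.len s) < minSize then 0
       else
        let first := PySem.Str.slice s none (some minSize)
        let cnt0 : PySem.Dict Char Int := PySem.Dict.counter first.toList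
        let distinct0 : Int := (PySem.Dict.size cnt0 : Int)
        let st0 : PySem.Dict String Int × Int :=
          if distinct0 ≤ maxLetters then (PySem.Dict.empty.insert first 1, 1)
          else (PySem.Dict.empty, 0)
        ((PySem.List.pyRange 1 ((PySem.Str.len s) - minSize + 1) 1).foldl
          (pvStepB s maxLetters minSize) (cnt0, distinct0, st0.1, st0.2)).2.2.2) := rfl

def pvWin (cs : List Char) (m j : Nat) : List Char := (cs.drop j).take m

def pvDcard (l : List Char) : Int := ((PySem.Set.ofList l).length : Int)

theorem pv_modify_eq_insert (d : PySem.Dict String Int) (k : String) :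
    d.modify k 0 (· + 1) = d.insert k (d.getD k 0 + 1) := by
  simp [PySem.Dict.modify, PySem.Dict.getD_eq_get?_getD]

theorem pv_slice_nil (xs : List Char) (i b : Int) (hb : 0 ≤ b) (h : b ≤ i) :
    PySem.List.slice xs (some i) (some b) = [] := by
  unfold PySem.List.slice PySem.List.clampIdx
  simp only
  apply List.take_eq_nil_iff.mpr
  left
  split_ifs <;> omega

theorem pv_dcard_toFinset (l : List Char) : pvDcard l = (l.toFinset.card : Int) := by
  unfold pvDcard
  have h1 : (PySem.Set.ofList l).Nodup := PySem.Set.nodup_ofList l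
  have h2 : (PySem.Set.ofList l).toFinset = l.toFinset := by
    ext c; simp [PySem.Set.mem_ofList]
  rw [← List.toFinset_card_of_nodup h1, h2]

theorem pv_dcard_cons (x : Char) (l : List Char) :
    pvDcard (x :: l) = pvDcard l + (if x ∈ l then 0 else 1) := by
  rw [pv_dcard_toFinset, pv_dcard_toFinset, List.toFinset_cons]
  by_cases h : x ∈ l
  · rw [if_pos h, Finset.insert_eq_self.mpr (List.mem_toFinset.mpr h)]; ring
  · rw [if_neg h, Finset.card_insert_of_notMem (fun hc => h (List.mem_toFinset.mp hc))]
    push_cast; ring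

theorem pv_dcard_append (l : List Char) (x : Char) :
    pvDcard (l ++ [x]) = pvDcard l + (if x ∈ l then 0 else 1) := by
  have : (l ++ [x]).toFinset = insert x l.toFinset := by
    ext c; simp
  rw [pv_dcard_toFinset, pv_dcard_toFinset, this]
  by_cases h : x ∈ l
  · rw [if_pos h, Finset.insert_eq_self.mpr (List.mem_toFinset.mpr h)]; ring
  · rw [if_neg h, Finset.card_insert_of_notMem (fun hc => h (List.mem_toFinset.mp hc))]
    push_cast; ring

theorem pv_win_head (cs : List Char) (m j : Nat) (h : j < cs.length) :
    pvWin cs (m + 1) j = cs[j] :: pvWin cs m (j + 1) := by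
  unfold pvWin
  rw [List.drop_eq_getElem_cons h, List.take_succ_cons]

theorem pv_win_last (cs : List Char) (m j : Nat) (h : j + m < cs.length) :
    pvWin cs (m + 1) j = pvWin cs m j ++ [cs[j + m]] := by
  unfold pvWin
  rw [List.take_add_one]
  congr 1
  rw [List.getElem?_drop, List.getElem?_eq_getElem h]
  rfl

theorem pv_setlen (l : List Char) :
    (PySem.Set.len (PySem.Set.ofList l) : Int) = pvDcard l := rfl

-- the main loop invariant: B's sliding counter tracks A's per-window set size
theorem pv_loop (s : String) (maxLetters minSize : Int) (hm : 1 ≤ minSize) (k : Nat) :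
    ∀ (j : Nat) (cnt : PySem.Dict Char Int) (distinct : Int)
      (occ : PySem.Dict String Int) (ans : Int),
    1 ≤ j → (j : Int) + k = (s.toList.length : Int) - minSize + 1 →
    (∀ c, cnt.getD c 0 = ((pvWin s.toList minSize.toNat (j - 1)).count c : Int)) →
    distinct = pvDcard (pvWin s.toList minSize.toNat (j - 1)) →
    (PySem.List.pyRange (j : Int) ((s.toList.length : Int) - minSize + 1) 1).foldl
        (pvStepA s maxLetters minSize) (occ, ans)
      = ((((PySem.List.pyRange (j : Int) ((s.toList.length : Int) - minSize + 1) 1).foldl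
          (pvStepB s maxLetters minSize) (cnt, distinct, occ, ans)).2.2.1),
         (((PySem.List.pyRange (j : Int) ((s.toList.length : Int) - minSize + 1) 1).foldl
          (pvStepB s maxLetters minSize) (cnt, distinct, occ, ans)).2.2.2)) := by
  induction k with
  | zero =>
    intro j cnt distinct occ ans hj he hcnt hd
    rw [PySem.List.pyRange_one_eq_nil (by omega)]
    simp
  | succ k ih =>
    intro j cnt distinct occ ans hj he hcnt hd
    have hlen0 : (0:Int) ≤ (s.toList.length : Int) := by positivity
    have hje : (j : Int) < (s.toList.length : Int) - minSize + 1 := by omega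
    obtain ⟨j1, rfl⟩ : ∃ j1, j = j1 + 1 := ⟨j - 1, by omega⟩
    obtain ⟨m1, hm1⟩ : ∃ m1, minSize.toNat = m1 + 1 :=
      ⟨minSize.toNat - 1, by omega⟩
    have hmn : ((minSize.toNat : Int)) = minSize := Int.toNat_of_nonneg (by omega)
    have hms : minSize = (m1 : Int) + 1 := by rw [← hmn, hm1]; push_cast; ring
    have hbound : j1 + 1 + (m1 + 1) ≤ s.toList.length := by
      have h1 : ((j1:Int) + 1) + minSize ≤ (s.toList.length : Int) := by omega
      rw [hms] at h1; exact_mod_cast by push_cast at h1 ⊢; omega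
    have hj1lt : j1 < s.toList.length := by omega
    have hjmlt : j1 + 1 + m1 < s.toList.length := by omega
    have hhead := pv_win_head s.toList m1 j1 hj1lt
    have hlast := pv_win_last s.toList m1 (j1+1) hjmlt
    -- previous-window invariant in head form
    rw [Nat.add_sub_cancel, hm1] at hcnt hd
    rw [PySem.List.pyRange_one_cons hje]
    simp only [List.foldl_cons]
    -- compute the two step results
    have hout : PySem.List.pyGetD s.toList ((↑(j1+1) : Int) - 1) ' ' = s.toList[j1] := by
      have h1 : ((j1+1 : Nat) : Int) - 1 = ((j1 : Nat) : Int) := by push_cast; ring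
      rw [h1, PySem.List.pyGetD_natCast, List.getD_eq_getElem s.toList ' ' hj1lt]
    have hinn : PySem.List.pyGetD s.toList ((↑(j1+1) : Int) + minSize - 1) ' '
        = s.toList[j1+1+m1] := by
      have h1 : ((j1+1 : Nat) : Int) + minSize - 1 = ((j1+1+m1 : Nat) : Int) := by
        rw [hms]; push_cast; ring
      rw [h1, PySem.List.pyGetD_natCast, List.getD_eq_getElem s.toList ' ' hjmlt]
    have hslice : (PySem.Str.slice s (some (↑(j1+1) : Int)) (some ((↑(j1+1) : Int) + minSize))).toList
        = pvWin s.toList (m1+1) (j1+1) := by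
      rw [PySem.Str.toList_slice, PySem.Chars.slice_eq_listSlice]
      have h1 : ((j1+1 : Nat) : Int) + minSize = ((j1+1 : Nat) : Int) + ((m1+1 : Nat) : Int) := by
        rw [hms]; push_cast; ring
      rw [h1, PySem.List.slice_natCast_add]
      rfl
    -- B's counter update tracks the window counts
    have hmid : ∀ c : Char,
        ((cnt.insert s.toList[j1] (cnt.getD s.toList[j1] 0 - 1)).getD c 0)
          = ((pvWin s.toList m1 (j1+1)).count c : Int) := by
      intro c
      rw [PySem.Dict.getD_insert]
      by_cases hc : c = s.toList[j1]
      · subst hc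
        rw [if_pos rfl, hcnt, hhead]
        simp
      · rw [if_neg hc, hcnt, hhead, List.count_cons]
        have : ¬ s.toList[j1] = c := fun h => hc h.symm
        simp [this]
    have hv : cnt.getD s.toList[j1] 0 - 1 = ((pvWin s.toList m1 (j1+1)).count s.toList[j1] : Int) := by
      rw [hcnt, hhead]; simp
    have hcur : ∀ c : Char,
        (((cnt.insert s.toList[j1] (cnt.getD s.toList[j1] 0 - 1)).insert s.toList[j1+1+m1]
            ((cnt.insert s.toList[j1] (cnt.getD s.toList[j1] 0 - 1)).getD s.toList[j1+1+m1] 0 + 1)).getD c 0)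
          = ((pvWin s.toList (m1+1) (j1+1)).count c : Int) := by
      intro c
      rw [PySem.Dict.getD_insert, hlast]
      by_cases hc : c = s.toList[j1+1+m1]
      · subst hc; rw [if_pos rfl, hmid]; simp
      · rw [if_neg hc, hmid, List.count_append, List.count_cons]
        have : ¬ s.toList[j1+1+m1] = c := fun h => hc h.symm
        simp [this]
    -- B's distinct tracks the window's distinct-letter count
    have hd1 : (if cnt.getD s.toList[j1] 0 - 1 = 0 then distinct - 1 else distinct)
        = pvDcard (pvWin s.toList m1 (j1+1)) := by
      rw [hv, hd, hhead, pv_dcard_cons]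
      by_cases hmem : s.toList[j1] ∈ pvWin s.toList m1 (j1+1)
      · have hc0 := List.count_pos_iff.mpr hmem
        rw [if_neg (by omega), if_pos hmem]
        ring
      · have hc0 := List.count_eq_zero.mpr hmem
        rw [if_pos (by omega), if_neg hmem]
        ring
    have hd2 : (if (cnt.insert s.toList[j1] (cnt.getD s.toList[j1] 0 - 1)).getD s.toList[j1+1+m1] 0 + 1 = 1
          then pvDcard (pvWin s.toList m1 (j1+1)) + 1 else pvDcard (pvWin s.toList m1 (j1+1)))
        = pvDcard (pvWin s.toList (m1+1) (j1+1)) := by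
      rw [hmid, hlast, pv_dcard_append]
      by_cases hmem : s.toList[j1+1+m1] ∈ pvWin s.toList m1 (j1+1)
      · have hc0 := List.count_pos_iff.mpr hmem
        rw [if_neg (by omega), if_pos hmem]
        ring
      · have hc0 := List.count_eq_zero.mpr hmem
        rw [if_pos (by omega), if_neg hmem]
    -- one synchronized step, then the induction hypothesis
    have h2 : (pvStepB s maxLetters minSize (cnt, distinct, occ, ans) (↑(j1+1))).1
          = (cnt.insert s.toList[j1] (cnt.getD s.toList[j1] 0 - 1)).insert s.toList[j1+1+m1]
              ((cnt.insert s.toList[j1] (cnt.getD s.toList[j1] 0 - 1)).getD s.toList[j1+1+m1] 0 + 1) := by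
      simp only [pvStepB, hout, hinn, hd1, hd2]
      split_ifs <;> rfl
    have h3 : (pvStepB s maxLetters minSize (cnt, distinct, occ, ans) (↑(j1+1))).2.1
          = pvDcard (pvWin s.toList (m1+1) (j1+1)) := by
      simp only [pvStepB, hout, hinn, hd1, hd2]
      split_ifs <;> rfl
    have h1 : pvStepA s maxLetters minSize (occ, ans) (↑(j1+1))
          = (fun st => (st.2.2.1, st.2.2.2))
              (pvStepB s maxLetters minSize (cnt, distinct, occ, ans) (↑(j1+1))) := by
      simp only [pvStepA, pvStepB, hout, hinn, hslice, hd1, hd2, pv_setlen]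
      by_cases hcond : pvDcard (pvWin s.toList (m1+1) (j1+1)) ≤ maxLetters
      · rw [if_pos hcond, if_pos hcond, pv_modify_eq_insert, PySem.Dict.getD_insert_self]
        simp only [Prod.mk.injEq]
        exact ⟨trivial, by omega⟩
      · rw [if_neg hcond, if_neg hcond]
    rw [h1]
    have hcast : ((j1 + 1 : Nat) : Int) + 1 = ((j1 + 1 + 1 : Nat) : Int) := by push_cast; ring
    rw [hcast]
    have := ih (j1 + 1 + 1)
      (pvStepB s maxLetters minSize (cnt, distinct, occ, ans) (↑(j1+1))).1
      (pvStepB s maxLetters minSize (cnt, distinct, occ, ans) (↑(j1+1))).2.1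
      (pvStepB s maxLetters minSize (cnt, distinct, occ, ans) (↑(j1+1))).2.2.1
      (pvStepB s maxLetters minSize (cnt, distinct, occ, ans) (↑(j1+1))).2.2.2
      (by omega) (by push_cast at he ⊢; omega)
      (by intro c; rw [h2]; rw [Nat.add_sub_cancel, hm1]; exact hcur c)
      (by rw [h3]; rw [Nat.add_sub_cancel, hm1])
    rw [this]

theorem pv_foldA_stuck (s : String) (maxLetters minSize : Int) (hml : maxLetters < 0) :
    ∀ (l : List Int) (occ : PySem.Dict String Int) (ans : Int),
      l.foldl (pvStepA s maxLetters minSize) (occ, ans) = (occ, ans) := by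
  intro l
  induction l with
  | nil => intro occ ans; rfl
  | cons i t ihh =>
    intro occ ans
    rw [List.foldl_cons]
    have hstep : pvStepA s maxLetters minSize (occ, ans) i = (occ, ans) := by
      simp only [pvStepA, pv_setlen, pv_dcard_toFinset]
      rw [if_neg (by omega)]
    rw [hstep, ihh]

theorem pv_first_slice (s : String) (minSize : Int) :
    PySem.Str.slice s (some 0) (some (0 + minSize)) = PySem.Str.slice s none (some minSize) := by
  simp [PySem.Str.slice]

theorem pv_first_list (s : String) (minSize : Int) (hm : 0 ≤ minSize) :
    (PySem.Str.slice s none (some minSize)).toList = pvWin s.toList minSize.toNat 0 := by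
  rw [PySem.Str.toList_slice, PySem.Chars.slice_eq_listSlice, PySem.List.slice_to s.toList hm]
  simp [pvWin]

theorem pv_counter_size (l : List Char) :
    ((PySem.Dict.size (PySem.Dict.counter l) : Int)) = pvDcard l := by
  have h1 : PySem.Dict.size (PySem.Dict.counter l) = (PySem.Dict.keys (PySem.Dict.counter l)).length := by
    simp [PySem.Dict.size, PySem.Dict.keys]
  rw [pvDcard, h1, PySem.Dict.keys_counter]

theorem pv_foldA_nonneg (s : String) (maxLetters minSize : Int) :
    ∀ (l : List Int) (occ : PySem.Dict String Int) (ans : Int),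
      (∀ k, 0 ≤ occ.getD k 0) → 0 ≤ ans →
      (∀ k, 0 ≤ (l.foldl (pvStepA s maxLetters minSize) (occ, ans)).1.getD k 0) ∧
        0 ≤ (l.foldl (pvStepA s maxLetters minSize) (occ, ans)).2 := by
  intro l
  induction l with
  | nil => intro occ ans h1 h2; exact ⟨h1, h2⟩
  | cons i t ihh =>
    intro occ ans h1 h2
    rw [List.foldl_cons]
    by_cases hcond : (PySem.Set.len (PySem.Set.ofList
        (PySem.Str.slice s (some i) (some (i + minSize))).toList) : Int) ≤ maxLetters
    · have hstep : pvStepA s maxLetters minSize (occ, ans) i =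
          (occ.insert (PySem.Str.slice s (some i) (some (i + minSize)))
            (occ.getD (PySem.Str.slice s (some i) (some (i + minSize))) 0 + 1),
           max ans (occ.getD (PySem.Str.slice s (some i) (some (i + minSize))) 0 + 1)) := by
        simp only [pvStepA]
        rw [if_pos hcond, pv_modify_eq_insert, PySem.Dict.getD_insert_self]
      rw [hstep]
      apply ihh
      · intro k
        rw [PySem.Dict.getD_insert]
        split_ifs
        · have := h1 (PySem.Str.slice s (some i) (some (i + minSize)))
          omega
        · exact h1 k
      · have := h1 (PySem.Str.slice s (some i) (some (i + minSize)))
        omega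
    · have hstep : pvStepA s maxLetters minSize (occ, ans) i = (occ, ans) := by
        simp only [pvStepA]
        rw [if_neg hcond]
      rw [hstep]
      exact ihh occ ans h1 h2

theorem maxFreq_spec : Claim_unchanged_maxFreq := by
  intro s maxLetters minSize maxSize hdom
  unfold Spec_maxFreq
  intro hnd
  rw [pv_maxFreq_eq, pv_maxFreq_alt_eq, PySem.Str.len_eq]
  have hlen0 : (0:Int) ≤ (s.toList.length : Int) := by positivity
  by_cases hm : 1 ≤ minSize
  · by_cases hn : (s.toList.length : Int) < minSize
    · rw [if_pos (Or.inr hn), PySem.List.pyRange_one_eq_nil (by omega)]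
      rfl
    · rw [if_neg (by push_neg; exact ⟨by omega, by omega⟩)]
      simp only
      have hmn : ((minSize.toNat : Int)) = minSize := Int.toNat_of_nonneg (by omega)
      have hfl := pv_first_list s minSize (by omega)
      have hsz := pv_counter_size (PySem.Str.slice s none (some minSize)).toList
      have h0e : (0:Int) < (s.toList.length : Int) - minSize + 1 := by omega
      rw [PySem.List.pyRange_one_cons h0e]
      simp only [List.foldl_cons]
      have hszw := pv_counter_size (pvWin s.toList minSize.toNat 0)
      have hA0 : pvStepA s maxLetters minSize (PySem.Dict.empty, 0) 0
          = ((if ((PySem.Dict.size (PySem.Dict.counter (PySem.Str.slice s none (some minSize)).toList) : Int)) ≤ maxLetters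
              then (PySem.Dict.empty.insert (PySem.Str.slice s none (some minSize)) 1, 1)
              else ((PySem.Dict.empty : PySem.Dict String Int), (0:Int))).1,
             (if ((PySem.Dict.size (PySem.Dict.counter (PySem.Str.slice s none (some minSize)).toList) : Int)) ≤ maxLetters
              then (PySem.Dict.empty.insert (PySem.Str.slice s none (some minSize)) 1, 1)
              else ((PySem.Dict.empty : PySem.Dict String Int), (0:Int))).2) := by
        simp only [pvStepA, pv_first_slice, hfl, pv_setlen, hszw]
        by_cases hcond : pvDcard (pvWin s.toList minSize.toNat 0) ≤ maxLetters
        · simp [hcond, pv_modify_eq_insert, PySem.Dict.getD_empty, PySem.Dict.getD_insert_self]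
        · simp [hcond]
      rw [hA0, zero_add]
      have hk : ∃ k : Nat, ((1:Nat) : Int) + k = (s.toList.length : Int) - minSize + 1 :=
        ⟨((s.toList.length : Int) - minSize).toNat, by omega⟩
      obtain ⟨k, hk⟩ := hk
      have hinv1 : ∀ c : Char,
          (PySem.Dict.counter (PySem.Str.slice s none (some minSize)).toList).getD c 0
            = ((pvWin s.toList minSize.toNat (1 - 1)).count c : Int) := by
        intro c
        rw [PySem.Dict.getD_counter, hfl]
      have hinv2 : ((PySem.Dict.size (PySem.Dict.counter (PySem.Str.slice s none (some minSize)).toList) : Int))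
          = pvDcard (pvWin s.toList minSize.toNat (1 - 1)) := by
        rw [hsz, hfl]
      have hloop := pv_loop s maxLetters minSize hm k 1
        (PySem.Dict.counter (PySem.Str.slice s none (some minSize)).toList)
        ((PySem.Dict.size (PySem.Dict.counter (PySem.Str.slice s none (some minSize)).toList) : Int))
        ((if ((PySem.Dict.size (PySem.Dict.counter (PySem.Str.slice s none (some minSize)).toList) : Int)) ≤ maxLetters
          then (PySem.Dict.empty.insert (PySem.Str.slice s none (some minSize)) 1, 1)
          else (PySem.Dict.empty, 0) : PySem.Dict String Int × Int)).1
        ((if ((PySem.Dict.size (PySem.Dict.counter (PySem.Str.slice s none (some minSize)).toList) : Int)) ≤ maxLetters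
          then (PySem.Dict.empty.insert (PySem.Str.slice s none (some minSize)) 1, 1)
          else (PySem.Dict.empty, 0) : PySem.Dict String Int × Int)).2
        (le_refl 1) hk hinv1 hinv2
      rw [Nat.cast_one] at hloop
      exact (congrArg Prod.snd hloop).trans rfl
  · have hml : maxLetters < 0 := by
      unfold D_maxFreq at hnd
      push_neg at hnd
      have := hnd (by omega)
      omega
    rw [if_pos (Or.inl (by omega))]
    rw [pv_foldA_stuck s maxLetters minSize hml]

theorem maxFreq_changed : Claim_changed_maxFreq := by
  unfold Claim_changed_maxFreq; decide

theorem maxFreq_tight : Claim_exact_maxFreq := by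
  intro s maxLetters minSize maxSize hdom hD
  obtain ⟨hmi, hml⟩ := hD
  rw [pv_maxFreq_eq, pv_maxFreq_alt_eq, PySem.Str.len_eq, if_pos (Or.inl hmi)]
  have hlen0 : (0:Int) ≤ (s.toList.length : Int) := by positivity
  have hsplit := PySem.List.pyRange_one_succ_right (a := 0)
    (b := (s.toList.length : Int) - minSize) (by omega)
  rw [hsplit, List.foldl_append]
  obtain ⟨hocc, hans⟩ := pv_foldA_nonneg s maxLetters minSize
    (PySem.List.pyRange 0 ((s.toList.length : Int) - minSize) 1) PySem.Dict.empty 0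
    (fun k => by rw [PySem.Dict.getD_empty]) le_rfl
  have hnil : (PySem.Str.slice s (some ((s.toList.length : Int) - minSize))
      (some ((s.toList.length : Int) - minSize + minSize))).toList = [] := by
    rw [PySem.Str.toList_slice, PySem.Chars.slice_eq_listSlice]
    exact pv_slice_nil _ _ _ (by omega) (by omega)
  simp only [List.foldl_cons, List.foldl_nil]
  have hstep : ∀ st : PySem.Dict String Int × Int,
      pvStepA s maxLetters minSize st ((s.toList.length : Int) - minSize)
        = (st.1.insert (PySem.Str.slice s (some ((s.toList.length : Int) - minSize))
              (some ((s.toList.length : Int) - minSize + minSize)))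
            (st.1.getD (PySem.Str.slice s (some ((s.toList.length : Int) - minSize))
              (some ((s.toList.length : Int) - minSize + minSize))) 0 + 1),
           max st.2 (st.1.getD (PySem.Str.slice s (some ((s.toList.length : Int) - minSize))
              (some ((s.toList.length : Int) - minSize + minSize))) 0 + 1)) := by
    intro st
    simp only [pvStepA, hnil]
    rw [if_pos (by rw [pv_setlen, pv_dcard_toFinset]; simpa using hml),
      pv_modify_eq_insert, PySem.Dict.getD_insert_self]
  rw [hstep]
  have ho := hocc (PySem.Str.slice s (some ((s.toList.length : Int) - minSize))
    (some ((s.toList.length : Int) - minSize + minSize)))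
  simp only
  omega
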